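-- pv_equiv track=rewrite | github.com/msr2903/himotoki-split | himotoki_split/counters.py | number_to_kana
-- ===== SOURCE A (Python) =====
-- from typing import Optional, List, Dict, Tuple, Set
--
-- DIGIT_TO_KANA: Dict[int, str] = {
--     0: 'ゼロ',
--     1: 'いち',
--     2: 'に',
--     3: 'さん',
--     4: 'よん',  # Common reading (し is also valid in some contexts)
--     5: 'ご',
--     6: 'ろく',
--     7: 'なな',  # Common reading (しち is also valid)
--     8: 'はち',
--     9: 'きゅう',  # Common reading (く is also valid)
-- }
--
-- def number_to_kana(n: int) -> str:
--     """Convert a number to its kana reading."""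
--     if n == 0:
--         return 'ゼロ'
--
--     parts = []
--
--     # Handle 10000s
--     if n >= 10000:
--         man = n // 10000
--         if man > 1:
--             parts.append(number_to_kana(man))
--         parts.append('まん')
--         n %= 10000
--
--     # Handle 1000s
--     if n >= 1000:
--         sen = n // 1000
--         if sen == 3:
--             parts.append('さんぜん')  # 3000 = sanzen (rendaku)
--         elif sen == 8:
--             parts.append('はっせん')  # 8000 = hassen (gemination)
--         elif sen > 1:
--             parts.append(DIGIT_TO_KANA.get(sen, ''))
--             parts.append('せん')
--         else:
--             parts.append('せん')
--         n %= 1000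
--
--     # Handle 100s
--     if n >= 100:
--         hyaku = n // 100
--         if hyaku == 3:
--             parts.append('さんびゃく')  # 300 = sanbyaku
--         elif hyaku == 6:
--             parts.append('ろっぴゃく')  # 600 = roppyaku
--         elif hyaku == 8:
--             parts.append('はっぴゃく')  # 800 = happyaku
--         elif hyaku > 1:
--             parts.append(DIGIT_TO_KANA.get(hyaku, ''))
--             parts.append('ひゃく')
--         else:
--             parts.append('ひゃく')
--         n %= 100
--
--     # Handle 10s
--     if n >= 10:
--         juu = n // 10
--         if juu > 1:
--             parts.append(DIGIT_TO_KANA.get(juu, ''))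
--         parts.append('じゅう')
--         n %= 10
--
--     # Handle ones
--     if n > 0:
--         parts.append(DIGIT_TO_KANA.get(n, ''))
--
--     return ''.join(parts)
-- ===== SOURCE B (Python) =====
-- DIGIT_TO_KANA = {
--     0: 'ゼロ', 1: 'いち', 2: 'に', 3: 'さん', 4: 'よん',
--     5: 'ご', 6: 'ろく', 7: 'なな', 8: 'はち', 9: 'きゅう',
-- }
--
-- SEN_KANA = {0: '', 1: 'せん', 3: 'さんぜん', 8: 'はっせん'}
-- HYAKU_KANA = {0: '', 1: 'ひゃく', 3: 'さんびゃく', 6: 'ろっぴゃく', 8: 'はっぴゃく'}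
-- JUU_KANA = {0: '', 1: 'じゅう'}
-- ONES_KANA = {0: ''}
--
--
-- def _below(x):
--     """Kana reading of 0 <= x < 10000 ('' for x <= 0), by divmod digit extraction."""
--     if x <= 0:
--         return ''
--     s, r = divmod(x, 1000)
--     h, r = divmod(r, 100)
--     t, d = divmod(r, 10)
--     return (SEN_KANA.get(s, DIGIT_TO_KANA[s] + 'せん')
--             + HYAKU_KANA.get(h, DIGIT_TO_KANA[h] + 'ひゃく')
--             + JUU_KANA.get(t, DIGIT_TO_KANA[t] + 'じゅう')
--             + ONES_KANA.get(d, DIGIT_TO_KANA[d]))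
--
--
-- def number_to_kana(n: int) -> str:
--     """Convert a number to its kana reading (iterative base-10000 peeling)."""
--     if n == 0:
--         return 'ゼロ'
--     if n < 0:
--         return ''
--     chunks = []
--     q = n
--     while q > 0:
--         chunks.append(q % 10000)
--         q //= 10000
--     rev = chunks[::-1]          # high-to-low
--     top, lowrev = rev[0], rev[1:]
--     segs = ['' if lowrev and top == 1 else _below(top)]
--     for c in lowrev:
--         segs += ['まん', _below(c)]
--     return ''.join(segs)
-- ===== Notes on version B (the rewrite author's own statement) =====
-- stated objective: alternative
-- what changed: Replaces A's recursion on the man quotient and its cascading threshold if-chains with in-place remainder reassignment by an iterative base-ten-thousand chunk-peeling loop plus a table-driven divmod digit helper (_below) joined high-to-low.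
import Mathlib
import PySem

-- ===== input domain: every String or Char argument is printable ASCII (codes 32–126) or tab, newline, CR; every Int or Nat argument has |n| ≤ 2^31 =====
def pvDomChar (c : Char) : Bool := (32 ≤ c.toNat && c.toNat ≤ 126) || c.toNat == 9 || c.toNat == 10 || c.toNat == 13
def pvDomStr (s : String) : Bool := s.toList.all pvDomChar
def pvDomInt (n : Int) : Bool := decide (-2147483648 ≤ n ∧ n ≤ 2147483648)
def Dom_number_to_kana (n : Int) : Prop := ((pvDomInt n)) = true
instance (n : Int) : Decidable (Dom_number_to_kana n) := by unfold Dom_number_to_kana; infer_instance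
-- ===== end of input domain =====

-- B replaces A's recursion and cascading `n %=` threshold chain by iterative base-10000
-- chunk peeling plus a divmod/table-driven digit helper (objective: alternative decomposition).

-- ===== PORT A =====
def DIGIT_TO_KANA : PySem.Dict Int String := PySem.Dict.ofList
  [(0, "ゼロ"), (1, "いち"), (2, "に"), (3, "さん"), (4, "よん"),
   (5, "ご"), (6, "ろく"), (7, "なな"), (8, "はち"), (9, "きゅう")]

def number_to_kana (n : Int) : String :=
  if n = 0 then "ゼロ"
  else
    let parts : List String := []
    -- 10000s (DIGIT_TO_KANA.get(x, '') is ported as Dict.getD with default "")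
    let parts := if _h : 10000 ≤ n then
        (if _hm : 1 < PySem.Int.floordiv n 10000 then
            parts ++ [number_to_kana (PySem.Int.floordiv n 10000)]
          else parts) ++ ["まん"]
      else parts
    let n1 := if 10000 ≤ n then PySem.Int.mod n 10000 else n
    -- 1000s
    let parts := if 1000 ≤ n1 then
        (if PySem.Int.floordiv n1 1000 = 3 then parts ++ ["さんぜん"]
         else if PySem.Int.floordiv n1 1000 = 8 then parts ++ ["はっせん"]
         else if 1 < PySem.Int.floordiv n1 1000 then
           parts ++ [PySem.Dict.getD DIGIT_TO_KANA (PySem.Int.floordiv n1 1000) "", "せん"]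
         else parts ++ ["せん"])
      else parts
    let n2 := if 1000 ≤ n1 then PySem.Int.mod n1 1000 else n1
    -- 100s
    let parts := if 100 ≤ n2 then
        (if PySem.Int.floordiv n2 100 = 3 then parts ++ ["さんびゃく"]
         else if PySem.Int.floordiv n2 100 = 6 then parts ++ ["ろっぴゃく"]
         else if PySem.Int.floordiv n2 100 = 8 then parts ++ ["はっぴゃく"]
         else if 1 < PySem.Int.floordiv n2 100 then
           parts ++ [PySem.Dict.getD DIGIT_TO_KANA (PySem.Int.floordiv n2 100) "", "ひゃく"]
         else parts ++ ["ひゃく"])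
      else parts
    let n3 := if 100 ≤ n2 then PySem.Int.mod n2 100 else n2
    -- 10s
    let parts := if 10 ≤ n3 then
        (if 1 < PySem.Int.floordiv n3 10 then
            parts ++ [PySem.Dict.getD DIGIT_TO_KANA (PySem.Int.floordiv n3 10) ""]
          else parts) ++ ["じゅう"]
      else parts
    let n4 := if 10 ≤ n3 then PySem.Int.mod n3 10 else n3
    -- ones
    let parts := if 0 < n4 then parts ++ [PySem.Dict.getD DIGIT_TO_KANA n4 ""] else parts
    String.join parts
termination_by n.toNat
decreasing_by
  simp only [PySem.Int.floordiv_eq_ediv_of_pos (show (0:Int) < 10000 by omega)] at *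
  omega

-- ===== PORT B =====
def DIGIT_KANA_B : PySem.Dict Int String := PySem.Dict.ofList
  [(0, "ゼロ"), (1, "いち"), (2, "に"), (3, "さん"), (4, "よん"),
   (5, "ご"), (6, "ろく"), (7, "なな"), (8, "はち"), (9, "きゅう")]
def SEN_KANA : PySem.Dict Int String := PySem.Dict.ofList
  [(0, ""), (1, "せん"), (3, "さんぜん"), (8, "はっせん")]
def HYAKU_KANA : PySem.Dict Int String := PySem.Dict.ofList
  [(0, ""), (1, "ひゃく"), (3, "さんびゃく"), (6, "ろっぴゃく"), (8, "はっぴゃく")]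
def JUU_KANA : PySem.Dict Int String := PySem.Dict.ofList [(0, ""), (1, "じゅう")]
def ONES_KANA : PySem.Dict Int String := PySem.Dict.ofList [(0, "")]

-- kana for 0 ≤ x < 10000 ('' for x ≤ 0); DIGIT_TO_KANA[digit] is total here (digit ∈ 0..9),
-- ported as Dict.getD with default ""
def below (x : Int) : String :=
  if x ≤ 0 then ""
  else
    let s := PySem.Int.floordiv x 1000
    let r := PySem.Int.mod x 1000
    let h := PySem.Int.floordiv r 100
    let r2 := PySem.Int.mod r 100
    let t := PySem.Int.floordiv r2 10
    let d := PySem.Int.mod r2 10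
    PySem.Dict.getD SEN_KANA s (PySem.Dict.getD DIGIT_KANA_B s "" ++ "せん")
      ++ PySem.Dict.getD HYAKU_KANA h (PySem.Dict.getD DIGIT_KANA_B h "" ++ "ひゃく")
      ++ PySem.Dict.getD JUU_KANA t (PySem.Dict.getD DIGIT_KANA_B t "" ++ "じゅう")
      ++ PySem.Dict.getD ONES_KANA d (PySem.Dict.getD DIGIT_KANA_B d "")

-- the while loop collecting q % 10000 and setting q //= 10000
def chunksOf (q : Int) : List Int :=
  if _h : 0 < q then PySem.Int.mod q 10000 :: chunksOf (PySem.Int.floordiv q 10000) else []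
termination_by q.toNat
decreasing_by
  simp only [PySem.Int.floordiv_eq_ediv_of_pos (show (0:Int) < 10000 by omega)] at *
  omega

def number_to_kana_alt (n : Int) : String :=
  if n = 0 then "ゼロ"
  else if n < 0 then ""
  else
    match (chunksOf n).reverse with     -- rev = chunks[::-1]; top, lowrev = rev[0], rev[1:]
    | [] => ""                          -- unreachable: chunks ≠ [] for n > 0
    | top :: lowrev =>
      let segs := [if lowrev ≠ [] ∧ top = 1 then "" else below top]
      let segs := lowrev.foldl (fun acc c => acc ++ ["まん", below c]) segs
      String.join segs

-- ===== PRECONDITION & SPEC =====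
def Spec_number_to_kana (n : Int) (out : String) : Prop := out = number_to_kana_alt n
instance (n : Int) (out : String) : Decidable (Spec_number_to_kana n out) := by unfold Spec_number_to_kana; infer_instance

-- ===== CLAIM (what is proved, stated in full; the proofs are below) =====
def Claim_equal_number_to_kana : Prop := ∀ (n : Int), Dom_number_to_kana n → Spec_number_to_kana n (number_to_kana n)

-- ===== LEMMAS AND PROOFS =====

theorem foldl_append_str (l : List String) (s : String) :
    List.foldl (· ++ ·) s l = s ++ String.join l := by
  induction l generalizing s with
  | nil => simp [String.join]
  | cons x xs ih =>
    rw [String.join, List.foldl_cons, List.foldl_cons, ih (s ++ x), ih ("" ++ x)]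
    simp [String.append_assoc]

theorem join_append (a b : List String) : String.join (a ++ b) = String.join a ++ String.join b := by
  rw [String.join, List.foldl_append, foldl_append_str b, ← String.join]

-- per-digit pieces of B's `below` (proof helpers)
def bsen (s : Int) : String := PySem.Dict.getD SEN_KANA s (PySem.Dict.getD DIGIT_KANA_B s "" ++ "せん")
def bhyaku (h : Int) : String := PySem.Dict.getD HYAKU_KANA h (PySem.Dict.getD DIGIT_KANA_B h "" ++ "ひゃく")
def bjuu (t : Int) : String := PySem.Dict.getD JUU_KANA t (PySem.Dict.getD DIGIT_KANA_B t "" ++ "じゅう")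
def bones (d : Int) : String := PySem.Dict.getD ONES_KANA d (PySem.Dict.getD DIGIT_KANA_B d "")

def below' (m : Int) : String :=
  bsen (PySem.Int.floordiv m 1000)
    ++ bhyaku (PySem.Int.floordiv (PySem.Int.mod m 1000) 100)
    ++ bjuu (PySem.Int.floordiv (PySem.Int.mod (PySem.Int.mod m 1000) 100) 10)
    ++ bones (PySem.Int.mod (PySem.Int.mod (PySem.Int.mod m 1000) 100) 10)

theorem below_eq_below' (m : Int) (h : 0 < m) : below m = below' m := by
  rw [below, if_neg (by omega)]
  rfl

theorem ite_append (c : Prop) [Decidable c] (p a : List String) :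
    (if c then p ++ a else p) = p ++ (if c then a else []) := by split_ifs <;> simp

theorem chain1 (p : List String) (m : Int) (h0 : 0 ≤ m) (hm : m < 10) :
    String.join (if 0 < m then p ++ [PySem.Dict.getD DIGIT_TO_KANA m ""] else p)
      = String.join p ++ bones m := by
  by_cases h : 0 < m
  · rw [if_pos h, join_append]
    congr 1
    interval_cases m <;> rfl
  · rw [if_neg h]
    have : m = 0 := by omega
    subst this
    show String.join p = String.join p ++ ""
    simp
theorem chain10 (p : List String) (m : Int) (h0 : 0 ≤ m) (hm : m < 100) :
    String.join (
      let parts := if 10 ≤ m then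
          (if 1 < PySem.Int.floordiv m 10 then
              p ++ [PySem.Dict.getD DIGIT_TO_KANA (PySem.Int.floordiv m 10) ""]
            else p) ++ ["じゅう"]
        else p
      let n4 := if 10 ≤ m then PySem.Int.mod m 10 else m
      if 0 < n4 then parts ++ [PySem.Dict.getD DIGIT_TO_KANA n4 ""] else parts)
      = String.join p ++ bjuu (PySem.Int.floordiv m 10) ++ bones (PySem.Int.mod m 10) := by
  have hd : PySem.Int.floordiv m 10 = m / 10 := PySem.Int.floordiv_eq_ediv_of_pos (by omega)
  have hm' : PySem.Int.mod m 10 = m % 10 := PySem.Int.mod_eq_emod_of_pos (by omega)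
  simp only [hd, hm']
  by_cases h : 10 ≤ m
  · simp only [if_pos h]
    rw [chain1 _ (m % 10) (by omega) (by omega)]
    rw [ite_append, List.append_assoc, join_append]
    congr 1
    congr 1
    set t := m / 10 with ht
    have h1 : 1 ≤ t := by omega
    have h9 : t ≤ 9 := by omega
    interval_cases t <;> rfl
  · simp only [if_neg h]
    rw [chain1 p m h0 (by omega)]
    have h10 : m / 10 = 0 := by omega
    have h11 : m % 10 = m := by omega
    rw [h10, h11]
    show String.join p ++ bones m = String.join p ++ "" ++ bones m
    simp
theorem chain100 (p : List String) (m : Int) (h0 : 0 ≤ m) (hm : m < 1000) :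
    String.join (
      let parts := if 100 ≤ m then
          (if PySem.Int.floordiv m 100 = 3 then p ++ ["さんびゃく"]
           else if PySem.Int.floordiv m 100 = 6 then p ++ ["ろっぴゃく"]
           else if PySem.Int.floordiv m 100 = 8 then p ++ ["はっぴゃく"]
           else if 1 < PySem.Int.floordiv m 100 then
             p ++ [PySem.Dict.getD DIGIT_TO_KANA (PySem.Int.floordiv m 100) "", "ひゃく"]
           else p ++ ["ひゃく"])
        else p
      let n3 := if 100 ≤ m then PySem.Int.mod m 100 else m
      let parts := if 10 ≤ n3 then
          (if 1 < PySem.Int.floordiv n3 10 then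
              parts ++ [PySem.Dict.getD DIGIT_TO_KANA (PySem.Int.floordiv n3 10) ""]
            else parts) ++ ["じゅう"]
        else parts
      let n4 := if 10 ≤ n3 then PySem.Int.mod n3 10 else n3
      if 0 < n4 then parts ++ [PySem.Dict.getD DIGIT_TO_KANA n4 ""] else parts)
      = String.join p ++ bhyaku (PySem.Int.floordiv m 100)
          ++ bjuu (PySem.Int.floordiv (PySem.Int.mod m 100) 10)
          ++ bones (PySem.Int.mod (PySem.Int.mod m 100) 10) := by
  have hd : PySem.Int.floordiv m 100 = m / 100 := PySem.Int.floordiv_eq_ediv_of_pos (by omega)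
  have hm' : PySem.Int.mod m 100 = m % 100 := PySem.Int.mod_eq_emod_of_pos (by omega)
  simp only [hd, hm']
  by_cases h : 100 ≤ m
  · simp only [if_pos h]
    rw [chain10 _ (m % 100) (by omega) (by omega)]
    rw [show (if m / 100 = 3 then p ++ ["さんびゃく"]
           else if m / 100 = 6 then p ++ ["ろっぴゃく"]
           else if m / 100 = 8 then p ++ ["はっぴゃく"]
           else if 1 < m / 100 then
             p ++ [PySem.Dict.getD DIGIT_TO_KANA (m / 100) "", "ひゃく"]
           else p ++ ["ひゃく"]) = p ++ (if m / 100 = 3 then ["さんびゃく"]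
           else if m / 100 = 6 then ["ろっぴゃく"]
           else if m / 100 = 8 then ["はっぴゃく"]
           else if 1 < m / 100 then
             [PySem.Dict.getD DIGIT_TO_KANA (m / 100) "", "ひゃく"]
           else ["ひゃく"]) from by split_ifs <;> rfl]
    rw [join_append]
    congr 3
    set t := m / 100 with ht
    have h1 : 1 ≤ t := by omega
    have h9 : t ≤ 9 := by omega
    interval_cases t <;> rfl
  · simp only [if_neg h]
    rw [chain10 p m h0 (by omega)]
    have h10 : m / 100 = 0 := by omega
    have h11 : m % 100 = m := by omega
    rw [h10, h11]
    show String.join p ++ bjuu _ ++ bones _ = String.join p ++ "" ++ bjuu _ ++ bones _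
    simp
theorem tail_chain (p : List String) (m : Int) (h0 : 0 ≤ m) (hm : m < 10000) :
    String.join (
      let parts := if 1000 ≤ m then
          (if PySem.Int.floordiv m 1000 = 3 then p ++ ["さんぜん"]
           else if PySem.Int.floordiv m 1000 = 8 then p ++ ["はっせん"]
           else if 1 < PySem.Int.floordiv m 1000 then
             p ++ [PySem.Dict.getD DIGIT_TO_KANA (PySem.Int.floordiv m 1000) "", "せん"]
           else p ++ ["せん"])
        else p
      let n2 := if 1000 ≤ m then PySem.Int.mod m 1000 else m
      let parts := if 100 ≤ n2 then
          (if PySem.Int.floordiv n2 100 = 3 then parts ++ ["さんびゃく"]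
           else if PySem.Int.floordiv n2 100 = 6 then parts ++ ["ろっぴゃく"]
           else if PySem.Int.floordiv n2 100 = 8 then parts ++ ["はっぴゃく"]
           else if 1 < PySem.Int.floordiv n2 100 then
             parts ++ [PySem.Dict.getD DIGIT_TO_KANA (PySem.Int.floordiv n2 100) "", "ひゃく"]
           else parts ++ ["ひゃく"])
        else parts
      let n3 := if 100 ≤ n2 then PySem.Int.mod n2 100 else n2
      let parts := if 10 ≤ n3 then
          (if 1 < PySem.Int.floordiv n3 10 then
              parts ++ [PySem.Dict.getD DIGIT_TO_KANA (PySem.Int.floordiv n3 10) ""]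
            else parts) ++ ["じゅう"]
        else parts
      let n4 := if 10 ≤ n3 then PySem.Int.mod n3 10 else n3
      if 0 < n4 then parts ++ [PySem.Dict.getD DIGIT_TO_KANA n4 ""] else parts)
      = String.join p ++ below' m := by
  have hd : PySem.Int.floordiv m 1000 = m / 1000 := PySem.Int.floordiv_eq_ediv_of_pos (by omega)
  have hm' : PySem.Int.mod m 1000 = m % 1000 := PySem.Int.mod_eq_emod_of_pos (by omega)
  simp only [below', hd, hm']
  by_cases h : 1000 ≤ m
  · simp only [if_pos h]
    rw [chain100 _ (m % 1000) (by omega) (by omega)]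
    rw [show (if m / 1000 = 3 then p ++ ["さんぜん"]
           else if m / 1000 = 8 then p ++ ["はっせん"]
           else if 1 < m / 1000 then
             p ++ [PySem.Dict.getD DIGIT_TO_KANA (m / 1000) "", "せん"]
           else p ++ ["せん"]) = p ++ (if m / 1000 = 3 then ["さんぜん"]
           else if m / 1000 = 8 then ["はっせん"]
           else if 1 < m / 1000 then
             [PySem.Dict.getD DIGIT_TO_KANA (m / 1000) "", "せん"]
           else ["せん"]) from by split_ifs <;> rfl]
    rw [join_append]
    simp only [String.append_assoc]
    congr 2
    set t := m / 1000 with ht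
    have h1 : 1 ≤ t := by omega
    have h9 : t ≤ 9 := by omega
    interval_cases t <;> rfl
  · simp only [if_neg h]
    rw [chain100 p m h0 (by omega)]
    have h10 : m / 1000 = 0 := by omega
    have h11 : m % 1000 = m := by omega
    rw [h10, h11]
    have hb : bsen 0 = "" := rfl
    rw [hb]
    simp [String.append_assoc]
theorem A_neg (n : Int) (h : n < 0) : number_to_kana n = "" := by
  have h1 : ¬(10000 ≤ n) := by omega
  have h2 : ¬(1000 ≤ n) := by omega
  have h3 : ¬(100 ≤ n) := by omega
  have h4 : ¬(10 ≤ n) := by omega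
  have h5 : ¬(0 < n) := by omega
  rw [number_to_kana, if_neg (by omega)]
  simp only [dif_neg h1, if_neg h1, if_neg h2, if_neg h3, if_neg h4, if_neg h5]
  rfl

theorem A_small (n : Int) (h0 : 0 < n) (hm : n < 10000) : number_to_kana n = below' n := by
  have h1 : ¬(10000 ≤ n) := by omega
  rw [number_to_kana, if_neg (by omega)]
  simp only [dif_neg h1, if_neg h1]
  exact (tail_chain [] n (by omega) hm).trans (by simp [String.join])

theorem below_eq_below'' (m : Int) (h : 0 ≤ m) : below m = below' m := by
  rcases eq_or_lt_of_le h with he | hl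
  · rw [← he]; rfl
  · exact below_eq_below' m hl

theorem A_big (n : Int) (h : 10000 ≤ n) :
    number_to_kana n =
      (if 1 < PySem.Int.floordiv n 10000 then number_to_kana (PySem.Int.floordiv n 10000) else "")
        ++ "まん" ++ below (PySem.Int.mod n 10000) := by
  have hm0 : 0 ≤ PySem.Int.mod n 10000 := PySem.Int.mod_nonneg n (by omega)
  have hm1 : PySem.Int.mod n 10000 < 10000 := PySem.Int.mod_lt n (by omega)
  rw [number_to_kana, if_neg (by omega)]
  simp only [dif_pos h, if_pos h]
  refine Eq.trans (tail_chain ((if 1 < PySem.Int.floordiv n 10000 then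
      [number_to_kana (PySem.Int.floordiv n 10000)] else []) ++ ["まん"])
      (PySem.Int.mod n 10000) hm0 hm1) ?_
  rw [below_eq_below'' _ hm0, join_append]
  by_cases hq : 1 < PySem.Int.floordiv n 10000
  · simp only [if_pos hq]
    simp [String.join, String.append_assoc]
  · simp only [if_neg hq]
    simp [String.join]

theorem chunksOf_nil (q : Int) (h : q ≤ 0) : chunksOf q = [] := by
  rw [chunksOf]; rw [dif_neg (by omega)]

theorem chunksOf_small (q : Int) (h0 : 0 < q) (hq : q < 10000) : chunksOf q = [q] := by
  rw [chunksOf, dif_pos h0]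
  have e1 : PySem.Int.mod q 10000 = q := by
    rw [PySem.Int.mod_eq_emod_of_pos (by omega)]; omega
  have e2 : PySem.Int.floordiv q 10000 = 0 := by
    rw [PySem.Int.floordiv_eq_ediv_of_pos (by omega)]; omega
  rw [e1, e2, chunksOf_nil 0 (by omega)]

theorem chunksOf_big (q : Int) (h : 10000 ≤ q) :
    chunksOf q = PySem.Int.mod q 10000 :: chunksOf (PySem.Int.floordiv q 10000) := by
  rw [chunksOf, dif_pos (by omega)]

theorem chunksOf_singleton (q t : Int) (h0 : 0 < q) (h : chunksOf q = [t]) : t = q := by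
  rw [chunksOf, dif_pos h0] at h
  obtain ⟨h1, h2⟩ := List.cons.injEq .. ▸ h
  have hf : ¬(0 < PySem.Int.floordiv q 10000) := by
    intro hp
    rw [chunksOf, dif_pos hp] at h2
    simp at h2
  have : q < 10000 := by
    rw [PySem.Int.floordiv_eq_ediv_of_pos (by omega)] at hf
    omega
  rw [← h1, PySem.Int.mod_eq_emod_of_pos (by omega)]
  omega

theorem alt_small (n : Int) (h0 : 0 < n) (hm : n < 10000) : number_to_kana_alt n = below n := by
  rw [number_to_kana_alt, if_neg (by omega), if_neg (by omega), chunksOf_small n h0 hm]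
  simp [String.join]

theorem chunksOf_ne_nil (q : Int) (h : 0 < q) : chunksOf q ≠ [] := by
  rw [chunksOf, dif_pos h]; simp

theorem alt_big (n : Int) (h : 10000 ≤ n) :
    number_to_kana_alt n =
      (if PySem.Int.floordiv n 10000 = 1 then ""
       else number_to_kana_alt (PySem.Int.floordiv n 10000))
        ++ "まん" ++ below (PySem.Int.mod n 10000) := by
  have hq1 : 0 < PySem.Int.floordiv n 10000 := by
    rw [PySem.Int.floordiv_eq_ediv_of_pos (by omega)]; omega
  obtain ⟨t, l, hrev⟩ : ∃ t l, (chunksOf (PySem.Int.floordiv n 10000)).reverse = t :: l := by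
    cases hc : (chunksOf (PySem.Int.floordiv n 10000)).reverse with
    | nil =>
      exact absurd (by simpa using congrArg List.reverse hc) (chunksOf_ne_nil _ hq1)
    | cons a b => exact ⟨a, b, rfl⟩
  have hone : (if l ++ [PySem.Int.mod n 10000] ≠ [] ∧ t = 1 then "" else below t)
      = (if t = 1 then "" else below t) := by simp
  rw [number_to_kana_alt, if_neg (by omega), if_neg (by omega), chunksOf_big n h]
  simp only [List.reverse_cons, hrev]
  show String.join ((l ++ [PySem.Int.mod n 10000]).foldl
      (fun acc c => acc ++ ["まん", below c])
      [if l ++ [PySem.Int.mod n 10000] ≠ [] ∧ t = 1 then "" else below t]) = _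
  rw [PySem.List.foldl_append_eq_flatMap, hone, List.flatMap_append, join_append, join_append]
  by_cases hq : PySem.Int.floordiv n 10000 = 1
  · have ht : t = 1 ∧ l = [] := by
      rw [hq, chunksOf_small 1 (by omega) (by omega)] at hrev
      simpa using hrev.symm
    rw [if_pos hq, if_pos ht.1, ht.2]
    simp [String.join]
  · rw [if_neg hq]
    have hBq : number_to_kana_alt (PySem.Int.floordiv n 10000)
        = String.join [if l ≠ [] ∧ t = 1 then "" else below t]
          ++ String.join (l.flatMap (fun c => ["まん", below c])) := by
      rw [number_to_kana_alt, if_neg (by omega), if_neg (by omega), hrev]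
      show String.join (l.foldl (fun acc c => acc ++ ["まん", below c])
        [if l ≠ [] ∧ t = 1 then "" else below t]) = _
      rw [PySem.List.foldl_append_eq_flatMap, join_append]
    rw [hBq]
    have hhead : (if t = 1 then "" else below t)
        = (if l ≠ [] ∧ t = 1 then "" else below t) := by
      by_cases ht1 : t = 1
      · have hl : l ≠ [] := by
          intro hlnil
          rw [hlnil] at hrev
          have hsing : chunksOf (PySem.Int.floordiv n 10000) = [t] := by
            simpa using congrArg List.reverse hrev
          have := chunksOf_singleton _ t hq1 hsing
          omega
        simp [ht1, hl]
      · simp [ht1]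
    rw [hhead]
    simp [String.join, String.append_assoc]

theorem A_zero : number_to_kana 0 = "ゼロ" := by rw [number_to_kana]; rfl

theorem alt_nonpos (n : Int) (h : n ≤ 0) : number_to_kana_alt n = number_to_kana n := by
  rcases eq_or_lt_of_le h with he | hl
  · rw [he, A_zero, number_to_kana_alt]; rfl
  · rw [number_to_kana_alt, if_neg (by omega), if_pos (by omega), A_neg n hl]

theorem main_eq (N : Nat) : ∀ n : Int, n.toNat ≤ N → number_to_kana n = number_to_kana_alt n := by
  induction N with
  | zero =>
    intro n hn
    exact (alt_nonpos n (by omega)).symm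
  | succ N ih =>
    intro n hn
    by_cases h0 : n ≤ 0
    case pos => exact (alt_nonpos n h0).symm
    replace h0 : 0 < n := by omega
    by_cases hs : n < 10000
    · rw [A_small n h0 hs, alt_small n h0 hs, below_eq_below'' n (by omega)]
    · replace hs : 10000 ≤ n := by omega
      rw [A_big n hs, alt_big n hs]
      congr 2
      have hq1 : 0 < PySem.Int.floordiv n 10000 := by
        rw [PySem.Int.floordiv_eq_ediv_of_pos (by omega)]; omega
      by_cases hq : PySem.Int.floordiv n 10000 = 1
      · rw [if_pos hq, if_neg (by omega)]
      · rw [if_pos (by omega), if_neg hq]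
        refine ih _ ?_
        rw [PySem.Int.floordiv_eq_ediv_of_pos (by omega)]
        omega

-- ===== VERDICT (by name: the statement is the Claim_ definition above) =====
theorem number_to_kana_spec : Claim_equal_number_to_kana := by
  intro n _
  unfold Spec_number_to_kana
  exact main_eq n.toNat n le_rfl
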